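-- pv_equiv track=rewrite | github.com/pypi-data/pypi-mirror-404 | packages/satellome/satellome-1.6.1-py3-none-any.whl/satellome/core_functions/tools/gene_intersect_streaming.py | filter_hits
-- ===== SOURCE A (Python) =====
-- def filter_hits(hits):
--     """Filter annotation hits based on feature hierarchy."""
--     features = [x[2] for x in hits]
--
--     hits = [x for x in hits if x[2] != "region"]
--
--     if "CDS" in features:
--         hits = [x for x in hits if x[2] not in ["gene", "mRNA", "exon"]]
--     if "ncRNA" in features:
--         hits = [x for x in hits if x[2] not in ["gene", "exon"]]
--     if "tRNA" in features:
--         hits = [x for x in hits if x[2] not in ["gene", "exon"]]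
--
--     hits = list(set([tuple(x) for x in hits]))
--
--     if len(hits) <= 1:
--         return hits
--     return hits
-- ===== SOURCE B (Python) =====
-- def filter_hits(hits):
--     """Filter annotation hits based on feature hierarchy."""
--     features = {x[2] for x in hits}
--     forbidden = {"region"}
--     if "CDS" in features:
--         forbidden.update(("gene", "mRNA", "exon"))
--     if "ncRNA" in features:
--         forbidden.update(("gene", "exon"))
--     if "tRNA" in features:
--         forbidden.update(("gene", "exon"))
--     return list(set(tuple(x) for x in hits if x[2] not in forbidden))
-- ===== Notes on version B (the rewrite author's own statement) =====
-- stated objective: simpler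
-- what changed: Instead of A's three sequential conditional filter passes, B precomputes one forbidden-label set from the snapshot of feature types and keeps each hit in a single pass; dedup via set unchanged.
import Mathlib
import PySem

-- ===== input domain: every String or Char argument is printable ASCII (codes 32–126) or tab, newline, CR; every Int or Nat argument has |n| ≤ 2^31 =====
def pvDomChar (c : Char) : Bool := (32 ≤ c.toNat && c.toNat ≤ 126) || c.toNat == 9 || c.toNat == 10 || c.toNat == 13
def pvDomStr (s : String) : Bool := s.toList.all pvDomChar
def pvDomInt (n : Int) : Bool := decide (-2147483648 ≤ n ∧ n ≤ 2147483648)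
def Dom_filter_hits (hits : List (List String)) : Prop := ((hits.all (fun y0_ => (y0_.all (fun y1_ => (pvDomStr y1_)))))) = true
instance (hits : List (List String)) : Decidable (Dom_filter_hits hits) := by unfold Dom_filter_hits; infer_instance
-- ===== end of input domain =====

-- B replaces A's three sequential conditional filter passes by one precomputed forbidden-label
-- set and a single filtering pass over the hits; the set-based dedup at the end is unchanged.

-- ===== PORT A =====
-- x[2]; the total form pyGetD is used, exact under Pre_ (every row has length ≥ 3)
def pvRow2 (x : List String) : String := PySem.List.pyGetD x 2 ""

def filter_hits (hits : List (List String)) : List (List String) :=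
  let features := hits.map pvRow2
  let hits1 := hits.filter (fun x => !(pvRow2 x == "region"))
  let hits2 := if features.contains "CDS" then
      hits1.filter (fun x => !((["gene", "mRNA", "exon"] : List String).contains (pvRow2 x)))
    else hits1
  let hits3 := if features.contains "ncRNA" then
      hits2.filter (fun x => !((["gene", "exon"] : List String).contains (pvRow2 x)))
    else hits2
  let hits4 := if features.contains "tRNA" then
      hits3.filter (fun x => !((["gene", "exon"] : List String).contains (pvRow2 x)))
    else hits3
  PySem.Set.ofList hits4

-- ===== PORT B =====
def filter_hits_alt (hits : List (List String)) : List (List String) :=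
  let features : PySem.Set String := PySem.Set.ofList (hits.map pvRow2)
  let f1 : PySem.Set String := PySem.Set.ofList ["region"]
  let f2 := if PySem.Set.contains features "CDS" then
      PySem.Set.update f1 ["gene", "mRNA", "exon"] else f1
  let f3 := if PySem.Set.contains features "ncRNA" then
      PySem.Set.update f2 ["gene", "exon"] else f2
  let forbidden := if PySem.Set.contains features "tRNA" then
      PySem.Set.update f3 ["gene", "exon"] else f3
  PySem.Set.ofList (hits.filter (fun x => !(PySem.Set.contains forbidden (pvRow2 x))))

-- ===== PRECONDITION & SPEC =====
-- Pre_ excludes inputs with a row of fewer than 3 fields, on which Python A raises IndexError at x[2].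
def Pre_filter_hits (hits : List (List String)) : Prop :=
  ∀ x ∈ hits, 3 ≤ x.length
instance (hits : List (List String)) : Decidable (Pre_filter_hits hits) := by
  unfold Pre_filter_hits; infer_instance
def pvWitness_filter_hits : List (List String) :=
  [["c1", "9", "CDS"], ["c1", "9", "gene"], ["c2", "3", "region"]]
def Spec_filter_hits (hits : List (List String)) (out : List (List String)) : Prop := out = filter_hits_alt hits
instance (hits : List (List String)) (out : List (List String)) : Decidable (Spec_filter_hits hits out) := by unfold Spec_filter_hits; infer_instance

-- ===== CLAIM (what is proved, stated in full; the proofs are below) =====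
def Claim_equal_filter_hits : Prop := ∀ (hits : List (List String)), Dom_filter_hits hits → Pre_filter_hits hits → Spec_filter_hits hits (filter_hits hits)

-- ===== LEMMAS AND PROOFS =====
-- The two ports agree on every input (Pre_ is only needed for faithfulness to Python, not here):
-- case-split on the three feature-presence conditions; in each case A's fused filter predicate
-- and B's forbidden-set membership test agree pointwise.
theorem ports_eq (hits : List (List String)) : filter_hits hits = filter_hits_alt hits := by
  unfold filter_hits filter_hits_alt
  dsimp only
  simp only [PySem.Set.contains, List.contains_eq_mem, PySem.Set.mem_ofList]
  cases hc : decide ("CDS" ∈ hits.map pvRow2) <;>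
  cases hn : decide ("ncRNA" ∈ hits.map pvRow2) <;>
  cases ht : decide ("tRNA" ∈ hits.map pvRow2) <;>
    simp only [Bool.false_eq_true, if_true, if_false, List.filter_filter] <;>
    refine congrArg PySem.Set.ofList (List.filter_congr fun x _ => ?_) <;>
    by_cases h1 : pvRow2 x = "region" <;> by_cases h2 : pvRow2 x = "gene" <;>
    by_cases h3 : pvRow2 x = "mRNA" <;> by_cases h4 : pvRow2 x = "exon" <;>
      simp [h1, h2, h3, h4, PySem.Set.contains, PySem.Set.update, PySem.Set.add,
        PySem.Set.ofList]

-- ===== VERDICT (by name: the statement is the Claim_ definition above) =====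
theorem filter_hits_spec : Claim_equal_filter_hits := by
  intro hits _ _
  unfold Spec_filter_hits
  exact ports_eq hits
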